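-- pv_equiv track=rewrite | github.com/wzh0528/DeepCTR-Torch | examples/test_run_ml1m.py | find_global_max_len
-- ===== SOURCE A (Python) =====
-- def find_global_max_len(nested_lists):
--     max_inner_len = 0
--     max_outer_len = 0
--     for outer_list in nested_lists:
--         max_outer_len = max(max_outer_len, len(outer_list))
--         for inner_list in outer_list:
--             max_inner_len = max(max_inner_len, len(inner_list))
--     return max_inner_len, max_outer_len
-- ===== SOURCE B (Python) =====
-- def find_global_max_len(nested_lists):
--     # Divide and conquer: split the outer list in half, solve each half
--     # recursively, merge by componentwise max.
--     n = len(nested_lists)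
--     if n == 0:
--         return (0, 0)
--     if n == 1:
--         outer = nested_lists[0]
--         mi = 0
--         for inner in outer:
--             if len(inner) > mi:
--                 mi = len(inner)
--         return (mi, len(outer))
--     mid = n // 2
--     li, lo = find_global_max_len(nested_lists[:mid])
--     ri, ro = find_global_max_len(nested_lists[mid:])
--     return (max(li, ri), max(lo, ro))
-- ===== Notes on version B (the rewrite author's own statement) =====
-- stated objective: alternative
-- what changed: Replaces A's single interleaved nested loop carrying two accumulators with a divide-and-conquer recursion that splits the outer list in half, solves each half recursively, and merges the two (inner,outer) maxima componentwise.
import Mathlib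
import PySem

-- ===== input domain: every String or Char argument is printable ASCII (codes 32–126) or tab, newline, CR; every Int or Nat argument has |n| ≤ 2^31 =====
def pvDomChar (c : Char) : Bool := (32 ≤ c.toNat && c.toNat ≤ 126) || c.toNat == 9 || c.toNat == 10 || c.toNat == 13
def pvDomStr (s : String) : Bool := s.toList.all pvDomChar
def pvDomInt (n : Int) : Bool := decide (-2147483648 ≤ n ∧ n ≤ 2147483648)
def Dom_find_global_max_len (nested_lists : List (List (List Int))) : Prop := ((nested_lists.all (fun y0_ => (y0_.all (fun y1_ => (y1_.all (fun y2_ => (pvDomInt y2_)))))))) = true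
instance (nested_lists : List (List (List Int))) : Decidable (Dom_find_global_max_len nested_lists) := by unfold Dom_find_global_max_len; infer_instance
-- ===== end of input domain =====

-- B replaces A's single interleaved nested loop with a divide-and-conquer recursion
-- (split the outer list in half, recurse, merge maxima componentwise); objective: alternative.

-- ===== PORT A =====
-- one interleaved loop carrying both accumulators (max_inner_len, max_outer_len)
def find_global_max_len (nested_lists : List (List (List Int))) : Int × Int :=
  let s := nested_lists.foldl
    (fun (st : Int × Int) outer_list =>
      let max_outer_len := max st.2 (outer_list.length : Int)
      let max_inner_len := outer_list.foldl
        (fun mi inner_list => max mi (inner_list.length : Int)) st.1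
      (max_inner_len, max_outer_len))
    (0, 0)
  (s.1, s.2)

-- ===== PORT B =====
-- Source B's base-case loop: `for inner in outer: if len(inner) > mi: mi = len(inner)`
def pvInnerMax : List (List Int) → Int → Int
  | [], mi => mi
  | inner :: rest, mi =>
      pvInnerMax rest (if (inner.length : Int) > mi then (inner.length : Int) else mi)

-- divide and conquer on the outer list: halves via take/drop (Python's slices [:mid], [mid:])
def find_global_max_len_alt : List (List (List Int)) → Int × Int
  | [] => (0, 0)
  | [outer] => (pvInnerMax outer 0, (outer.length : Int))
  | x :: y :: rest =>
      let n := (x :: y :: rest).length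
      let mid := n / 2
      let l := find_global_max_len_alt ((x :: y :: rest).take mid)
      let r := find_global_max_len_alt ((x :: y :: rest).drop mid)
      (max l.1 r.1, max l.2 r.2)
termination_by nl => nl.length
decreasing_by
  · simp [List.length_take]; omega
  · simp [List.length_drop]; omega

-- ===== PRECONDITION & SPEC =====
def Spec_find_global_max_len (nested_lists : List (List (List Int))) (out : Int × Int) : Prop := out = find_global_max_len_alt nested_lists
instance (nested_lists : List (List (List Int))) (out : Int × Int) : Decidable (Spec_find_global_max_len nested_lists out) := by unfold Spec_find_global_max_len; infer_instance

-- ===== CLAIM (what is proved, stated in full; the proofs are below) =====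
def Claim_equal_find_global_max_len : Prop := ∀ (nested_lists : List (List (List Int))), Dom_find_global_max_len nested_lists → Spec_find_global_max_len nested_lists (find_global_max_len nested_lists)

-- ===== LEMMAS AND PROOFS =====

-- the common characterisation: max of inner lengths over the flattened list, max of outer lengths
def pvI (nl : List (List (List Int))) : Int :=
  ((nl.flatMap (fun o => o)).map (fun i => (i.length : Int))).foldl max 0
def pvO (nl : List (List (List Int))) : Int :=
  (nl.map (fun o => (o.length : Int))).foldl max 0

theorem pv_fold_shift (l : List Int) (a b : Int) :
    l.foldl max (max a b) = max a (l.foldl max b) := by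
  induction l generalizing b with
  | nil => simp
  | cons x xs ih => simp [List.foldl_cons, max_assoc, ih]

theorem pv_fold_nonneg (l : List Int) : 0 ≤ l.foldl max 0 := by
  cases l with
  | nil => simp
  | cons x xs =>
      simp only [List.foldl_cons, pv_fold_shift]
      exact le_max_left _ _

theorem pv_fold_append (xs ys : List Int) :
    (xs ++ ys).foldl max (0:Int) = max (xs.foldl max 0) (ys.foldl max 0) := by
  rw [List.foldl_append]
  have ha : max (xs.foldl max (0:Int)) 0 = xs.foldl max 0 := max_eq_left (pv_fold_nonneg xs)
  calc ys.foldl max (xs.foldl max (0:Int))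
      = ys.foldl max (max (xs.foldl max 0) 0) := by rw [ha]
    _ = max (xs.foldl max 0) (ys.foldl max 0) := pv_fold_shift _ _ _

-- A equals (pvI, pvO): split the interleaved fold
theorem pvA_eq (nl : List (List (List Int))) (a b : Int) :
    nl.foldl
      (fun (st : Int × Int) outer_list =>
        (outer_list.foldl (fun mi inner_list => max mi (inner_list.length : Int)) st.1,
         max st.2 (outer_list.length : Int)))
      (a, b)
    = (((nl.flatMap (fun o => o)).map (fun i => (i.length : Int))).foldl max a,
       (nl.map (fun o => (o.length : Int))).foldl max b) := by
  induction nl generalizing a b with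
  | nil => simp
  | cons o rest ih =>
      simp only [List.foldl_cons, List.flatMap_cons, List.map_cons, List.map_append,
        List.foldl_append, ih]
      congr 1
      have h : ∀ (xs : List (List Int)) (a : Int),
          xs.foldl (fun mi inner_list => max mi (inner_list.length : Int)) a
            = (xs.map (fun i => (i.length : Int))).foldl max a := by
        intro xs
        induction xs with
        | nil => intro a; simp
        | cons x xs ih2 => intro a; simp [ih2]
      rw [h]

theorem pvInnerMax_eq (o : List (List Int)) (mi : Int) :
    pvInnerMax o mi = (o.map (fun i => (i.length : Int))).foldl max mi := by
  induction o generalizing mi with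
  | nil => simp [pvInnerMax]
  | cons x xs ih =>
      simp only [pvInnerMax, List.map_cons, List.foldl_cons, ih]
      congr 1
      by_cases h : (x.length : Int) > mi <;> simp [h] <;> omega

theorem pvI_append (xs ys : List (List (List Int))) :
    pvI (xs ++ ys) = max (pvI xs) (pvI ys) := by
  simp only [pvI, List.flatMap_append, List.map_append]
  exact pv_fold_append _ _

theorem pvO_append (xs ys : List (List (List Int))) :
    pvO (xs ++ ys) = max (pvO xs) (pvO ys) := by
  simp only [pvO, List.map_append]
  exact pv_fold_append _ _

theorem pvB_eq (nl : List (List (List Int))) :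
    find_global_max_len_alt nl = (pvI nl, pvO nl) := by
  induction nl using find_global_max_len_alt.induct with
  | case1 => simp [find_global_max_len_alt, pvI, pvO]
  | case2 outer =>
      simp [find_global_max_len_alt, pvI, pvO, pvInnerMax_eq]
  | case3 x y rest n mid ihl ihr =>
      rw [find_global_max_len_alt]
      have hm : mid = (x :: y :: rest).length / 2 := rfl
      rw [← hm]
      simp only [ihl, ihr]
      have hsplit : x :: y :: rest
          = (x :: y :: rest).take mid ++ (x :: y :: rest).drop mid :=
        (List.take_append_drop _ _).symm
      refine Prod.ext ?_ ?_
      · show max (pvI _) (pvI _) = pvI (x :: y :: rest)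
        conv_rhs => rw [hsplit]
        exact (pvI_append _ _).symm
      · show max (pvO _) (pvO _) = pvO (x :: y :: rest)
        conv_rhs => rw [hsplit]
        exact (pvO_append _ _).symm

-- ===== VERDICT (by name: the statement is the Claim_ definition above) =====
theorem find_global_max_len_spec : Claim_equal_find_global_max_len := by
  intro nl _
  show _ = _
  rw [pvB_eq]
  simp only [find_global_max_len]
  rw [pvA_eq]
  simp only [pvI, pvO]
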